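-- pv_equiv track=rewrite | github.com/ajaypisharody/project-rfq | utils/comparer.py | _enum_match
-- ===== SOURCE A (Python) =====
-- EQUIV = {
--     'Casing Material': {
--         'A216 WCB': {'a216 wcb','wcb','carbon steel','cs','a216wcb'},
--     },
--     'Impeller Material': {
--         'CF8M': {'cf8m','a351 cf8m','ss316'},
--         'CA6NM': {'ca6nm','a743 ca6nm'},
--         'A890 4A': {'a890 4a','duplex'},
--         'A890 5A': {'a890 5a','super duplex'},
--     },
--     'Seal Plan': {
--         '53B': {'53b','plan 53b'},
--         '53A': {'53a','plan 53a'},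
--         '23':  {'23','plan 23'},
--         '52':  {'52','plan 52'},
--     },
--     'Motor Protection': {
--         'Ex d IIB T4': {'ex d iib t4'},
--         'Ex d': {'ex d'},
--         'Ex e': {'ex e'},
--         'ATEX': {'atex'}
--     },
--     'Standard - API 610': {
--         'API 610': {'api610','api 610','iso 13709'}
--     },
--     'Standard - API 682': {
--         'API 682': {'api 682'}
--     }
-- }
--
-- def _enum_match(param, cust_val, eng_val):
--     if cust_val is None or eng_val is None:
--         return False
--     cust = str(cust_val).strip().lower()
--     eng  = str(eng_val).strip().lower()
--     if cust == eng:
--         return True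
--     # mapped equivalence
--     groups = EQUIV.get(param, {})
--     for canonical, aliases in groups.items():
--         canon_l = canonical.strip().lower()
--         if (cust in aliases or cust == canon_l) and (eng in aliases or eng == canon_l):
--             return True
--     return False
-- ===== SOURCE B (Python) =====
-- EQUIV = {
--     'Casing Material': {
--         'A216 WCB': {'a216 wcb','wcb','carbon steel','cs','a216wcb'},
--     },
--     'Impeller Material': {
--         'CF8M': {'cf8m','a351 cf8m','ss316'},
--         'CA6NM': {'ca6nm','a743 ca6nm'},
--         'A890 4A': {'a890 4a','duplex'},
--         'A890 5A': {'a890 5a','super duplex'},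
--     },
--     'Seal Plan': {
--         '53B': {'53b','plan 53b'},
--         '53A': {'53a','plan 53a'},
--         '23':  {'23','plan 23'},
--         '52':  {'52','plan 52'},
--     },
--     'Motor Protection': {
--         'Ex d IIB T4': {'ex d iib t4'},
--         'Ex d': {'ex d'},
--         'Ex e': {'ex e'},
--         'ATEX': {'atex'}
--     },
--     'Standard - API 610': {
--         'API 610': {'api610','api 610','iso 13709'}
--     },
--     'Standard - API 682': {
--         'API 682': {'api 682'}
--     }
-- }
--
-- def _build_index(groups):
--     idx = {}
--     for canonical, aliases in groups.items():
--         idx[canonical.strip().lower()] = canonical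
--         for alias in aliases:
--             idx[alias] = canonical
--     return idx
--
-- # reverse index precomputed once: value -> canonical key, per parameter
-- _INDEX = {param: _build_index(groups) for param, groups in EQUIV.items()}
--
-- def _enum_match(param, cust_val, eng_val):
--     if cust_val is None or eng_val is None:
--         return False
--     cust = str(cust_val).strip().lower()
--     eng = str(eng_val).strip().lower()
--     if cust == eng:
--         return True
--     idx = _INDEX.get(param, {})
--     c = idx.get(cust)
--     return c is not None and c == idx.get(eng)
-- ===== Notes on version B (the rewrite author's own statement) =====
-- stated objective: alternative
-- what changed: B replaces A's per-call linear scan over the equivalence groups by a reverse index (alias/lowercased-canonical -> canonical) precomputed once at module load, answering each call with two dict lookups and one comparison.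
import Mathlib
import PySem

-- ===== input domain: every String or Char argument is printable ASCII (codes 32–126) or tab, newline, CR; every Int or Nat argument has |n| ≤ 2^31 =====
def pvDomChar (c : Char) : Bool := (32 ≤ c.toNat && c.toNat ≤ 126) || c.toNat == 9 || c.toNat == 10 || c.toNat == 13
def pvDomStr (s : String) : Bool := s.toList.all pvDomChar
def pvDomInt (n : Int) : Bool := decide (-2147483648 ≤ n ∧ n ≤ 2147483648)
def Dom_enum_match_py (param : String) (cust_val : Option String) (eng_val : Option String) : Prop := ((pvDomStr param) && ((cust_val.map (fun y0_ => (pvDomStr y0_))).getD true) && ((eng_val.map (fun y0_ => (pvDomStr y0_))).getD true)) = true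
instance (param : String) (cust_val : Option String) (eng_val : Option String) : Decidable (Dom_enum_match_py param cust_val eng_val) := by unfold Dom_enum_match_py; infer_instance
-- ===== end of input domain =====

-- B replaces A's per-call scan over the equivalence groups by a precomputed reverse
-- index (value -> canonical) looked up twice (objective: alternative structure).


-- ===== PORT A =====
-- the module constant EQUIV (dict -> assoc list, set -> list of its distinct elements)
def pvEQUIV : List (String × List (String × List String)) := [
  ("Casing Material", [("A216 WCB", ["a216 wcb","wcb","carbon steel","cs","a216wcb"])]),
  ("Impeller Material", [("CF8M", ["cf8m","a351 cf8m","ss316"]), ("CA6NM", ["ca6nm","a743 ca6nm"]),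
    ("A890 4A", ["a890 4a","duplex"]), ("A890 5A", ["a890 5a","super duplex"])]),
  ("Seal Plan", [("53B", ["53b","plan 53b"]), ("53A", ["53a","plan 53a"]),
    ("23", ["23","plan 23"]), ("52", ["52","plan 52"])]),
  ("Motor Protection", [("Ex d IIB T4", ["ex d iib t4"]), ("Ex d", ["ex d"]),
    ("Ex e", ["ex e"]), ("ATEX", ["atex"])]),
  ("Standard - API 610", [("API 610", ["api610","api 610","iso 13709"])]),
  ("Standard - API 682", [("API 682", ["api 682"])])]

-- A's for-loop with early 'return True' over the groups of EQUIV.get(param, {})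
def pvMatchGroups (groups : List (String × List String)) (cust eng : String) : Bool :=
  groups.any (fun p =>
    let canonL := PySem.Str.lower (PySem.Str.strip p.1)
    (p.2.contains cust || cust == canonL) && (p.2.contains eng || eng == canonL))

def enum_match_py (param : String) (cust_val : Option String) (eng_val : Option String) : Bool :=
  match cust_val, eng_val with
  | none, _ => false
  | _, none => false
  | some cv, some ev =>
    let cust := PySem.Str.lower (PySem.Str.strip cv)
    let eng := PySem.Str.lower (PySem.Str.strip ev)
    if cust == eng then true
    else pvMatchGroups ((pvEQUIV.lookup param).getD []) cust eng

-- ===== PORT B =====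
-- Source B's _build_index: reverse index value -> canonical for one parameter's groups
def pvBuildIndex (groups : List (String × List String)) : PySem.Dict String String :=
  groups.foldl (fun idx p =>
    p.2.foldl (fun idx a => idx.insert a p.1)
      (idx.insert (PySem.Str.lower (PySem.Str.strip p.1)) p.1))
    PySem.Dict.empty

-- Source B's module-level _INDEX, precomputed once per parameter
def pvINDEX : List (String × PySem.Dict String String) :=
  pvEQUIV.map (fun g => (g.1, pvBuildIndex g.2))

-- 'c = idx.get(cust); return c is not None and c == idx.get(eng)'
def pvLookupBoth (idx : PySem.Dict String String) (cust eng : String) : Bool :=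
  match idx.get? cust with
  | none => false
  | some c => some c == idx.get? eng

def enum_match_py_alt (param : String) (cust_val : Option String) (eng_val : Option String) : Bool :=
  match cust_val, eng_val with
  | none, _ => false
  | _, none => false
  | some cv, some ev =>
    let cust := PySem.Str.lower (PySem.Str.strip cv)
    let eng := PySem.Str.lower (PySem.Str.strip ev)
    if cust == eng then true
    else pvLookupBoth ((pvINDEX.lookup param).getD PySem.Dict.empty) cust eng

-- ===== PRECONDITION & SPEC =====
def Spec_enum_match_py (param : String) (cust_val : Option String) (eng_val : Option String) (out : Bool) : Prop := out = enum_match_py_alt param cust_val eng_val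
instance (param : String) (cust_val : Option String) (eng_val : Option String) (out : Bool) : Decidable (Spec_enum_match_py param cust_val eng_val out) := by unfold Spec_enum_match_py; infer_instance

-- ===== CLAIM (what is proved, stated in full; the proofs are below) =====
def Claim_equal_enum_match_py : Prop := ∀ (param : String) (cust_val : Option String) (eng_val : Option String), Dom_enum_match_py param cust_val eng_val → Spec_enum_match_py param cust_val eng_val (enum_match_py param cust_val eng_val)

-- ===== LEMMAS AND PROOFS =====

-- all strings a group p matches (its aliases and its lowercased stripped canonical)
def pvKeysOf (p : String × List String) : List String :=
  p.2 ++ [PySem.Str.lower (PySem.Str.strip p.1)]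

-- one group's membership test, as A's loop body computes it
def pvMemG (x : String) (p : String × List String) : Bool :=
  p.2.contains x || x == PySem.Str.lower (PySem.Str.strip p.1)

lemma pvMemG_iff (x : String) (p : String × List String) :
    pvMemG x p = true ↔ x ∈ pvKeysOf p := by
  simp [pvMemG, pvKeysOf]

-- the inner alias fold: inserting a constant value under each key of `as`
lemma get?_foldl_insert_const (as : List String) (v : String)
    (d : PySem.Dict String String) (x : String) :
    ((as.foldl (fun d a => d.insert a v) d).get? x)
      = if x ∈ as then some v else d.get? x := by
  induction as generalizing d with
  | nil => simp
  | cons a as ih =>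
    simp only [List.foldl_cons, ih, List.mem_cons]
    by_cases hx : x = a
    · subst hx
      simp [PySem.Dict.get?_insert_self]
    · simp [hx, PySem.Dict.get?_insert_of_ne d v hx]

-- the outer fold of pvBuildIndex: a lookup returns the canonical of the (by
-- disjointness unique) group whose key set contains x, else falls through to d
lemma get?_buildfold (g : List (String × List String)) (d : PySem.Dict String String)
    (x : String)
    (hdis : List.Pairwise (fun p q => ∀ y ∈ pvKeysOf p, y ∉ pvKeysOf q) g) :
    ((g.foldl (fun idx p =>
        p.2.foldl (fun idx a => idx.insert a p.1)
          (idx.insert (PySem.Str.lower (PySem.Str.strip p.1)) p.1)) d).get? x)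
      = match g.find? (fun p => pvMemG x p) with
        | some p => some p.1
        | none => d.get? x := by
  induction g generalizing d with
  | nil => simp
  | cons p g ih =>
    rcases List.pairwise_cons.mp hdis with ⟨hp, hg⟩
    simp only [List.foldl_cons]
    rw [ih _ hg]
    by_cases hm : pvMemG x p = true
    · have hx : x ∈ pvKeysOf p := (pvMemG_iff x p).mp hm
      have hnone : g.find? (fun q => pvMemG x q) = none := by
        rw [List.find?_eq_none]
        intro q hq
        simp only [Bool.not_eq_true]
        rcases h : pvMemG x q with _ | _
        · rfl
        · exact absurd ((pvMemG_iff x q).mp h) (hp q hq x hx)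
      rw [hnone]
      simp only [List.find?_cons, hm]
      rw [get?_foldl_insert_const]
      rcases (by simpa [pvKeysOf] using hx : x ∈ p.2 ∨ x = PySem.Str.lower (PySem.Str.strip p.1)) with h2 | h2
      · simp [h2]
      · subst h2
        split <;> simp [PySem.Dict.get?_insert_self]
    · simp only [List.find?_cons, hm]
      have hx : ¬ x ∈ pvKeysOf p := fun h => hm ((pvMemG_iff x p).mpr h)
      have h2 : ¬ x ∈ p.2 := fun h => hx (by simp [pvKeysOf, h])
      have h3 : x ≠ PySem.Str.lower (PySem.Str.strip p.1) := fun h => hx (by simp [pvKeysOf, h])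
      cases hf : g.find? (fun q => pvMemG x q) with
      | some r => simp
      | none =>
        rw [get?_foldl_insert_const, if_neg h2]
        exact PySem.Dict.get?_insert_of_ne d p.1 h3

-- disjointness is symmetric, so Pairwise gives it between any two distinct members
lemma keys_unique (g : List (String × List String))
    (hdis : List.Pairwise (fun p q => ∀ y ∈ pvKeysOf p, y ∉ pvKeysOf q) g)
    {p q : String × List String} (hp : p ∈ g) (hq : q ∈ g) {y : String}
    (hyp : y ∈ pvKeysOf p) (hyq : y ∈ pvKeysOf q) : p = q := by
  by_cases h : p = q
  · exact h
  · have hsym : Symmetric (fun p q : String × List String => ∀ y ∈ pvKeysOf p, y ∉ pvKeysOf q) := by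
      intro a b hab y hyb hya
      exact hab y hya hyb
    exact absurd hyq (hdis.forall hsym hp hq h y hyp)

-- the per-parameter equivalence: A's group scan equals B's two index lookups
lemma scan_eq_lookup (g : List (String × List String))
    (hdis : List.Pairwise (fun p q => ∀ y ∈ pvKeysOf p, y ∉ pvKeysOf q) g)
    (hn : (g.map Prod.fst).Nodup)
    (cust eng : String) :
    pvMatchGroups g cust eng = pvLookupBoth (pvBuildIndex g) cust eng := by
  have hb : ∀ x, (pvBuildIndex g).get? x
      = match g.find? (fun p => pvMemG x p) with
        | some p => some p.1
        | none => none := by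
    intro x
    rw [pvBuildIndex, get?_buildfold g _ x hdis]
    cases g.find? (fun p => pvMemG x p) <;> simp [PySem.Dict.get?_empty]
  have hA : pvMatchGroups g cust eng
      = g.any (fun p => pvMemG cust p && pvMemG eng p) := by
    simp [pvMatchGroups, pvMemG]
  rw [hA, pvLookupBoth, hb cust, hb eng]
  cases hfc : g.find? (fun p => pvMemG cust p) with
  | none =>
    rw [List.find?_eq_none] at hfc
    simp only [List.any_eq_false]
    rintro p hp
    have hc := hfc p hp
    simp only [Bool.not_eq_true] at hc
    simp [hc]
  | some p =>
    have hpc : pvMemG cust p = true := List.find?_some hfc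
    have hpg : p ∈ g := List.mem_of_find?_eq_some hfc
    cases hfe : g.find? (fun q => pvMemG eng q) with
    | none =>
      rw [List.find?_eq_none] at hfe
      have hfa : (g.any fun p => pvMemG cust p && pvMemG eng p) = false := by
        simp only [List.any_eq_false]
        rintro q hq
        have he := hfe q hq
        simp only [Bool.not_eq_true] at he
        simp [he]
      rw [hfa]
      rfl
    | some q =>
      have hqe : pvMemG eng q = true := List.find?_some hfe
      have hqg : q ∈ g := List.mem_of_find?_eq_some hfe
      rw [Bool.eq_iff_iff]
      simp only [List.any_eq_true, Bool.and_eq_true]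
      constructor
      · rintro ⟨r, hrg, hrc, hre⟩
        have h1 : r = p := keys_unique g hdis hrg hpg ((pvMemG_iff _ _).mp hrc) ((pvMemG_iff _ _).mp hpc)
        have h2 : r = q := keys_unique g hdis hrg hqg ((pvMemG_iff _ _).mp hre) ((pvMemG_iff _ _).mp hqe)
        rw [← h1, ← h2]
        simp
      · intro hpq
        have hpq1 : p.1 = q.1 := by simpa using hpq
        have hpq' : p = q := List.inj_on_of_nodup_map hn hpg hqg hpq1
        exact ⟨p, hpg, hpc, hpq' ▸ hqe⟩

-- lookup commutes with mapping the values
lemma lookup_map_snd {β γ : Type} (l : List (String × β)) (f : β → γ) (k : String) :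
    (l.map (fun p => (p.1, f p.2))).lookup k = (l.lookup k).map f := by
  induction l with
  | nil => simp
  | cons p l ih => by_cases h : k == p.1 <;> simp [List.lookup, h, ih]

-- a successful lookup returns one of the stored values
lemma lookup_mem_snd {β : Type} (l : List (String × β)) (k : String) (v : β)
    (h : l.lookup k = some v) : v ∈ l.map Prod.snd := by
  induction l with
  | nil => simp [List.lookup] at h
  | cons p l ih =>
    simp only [List.lookup] at h
    by_cases hk : k == p.1
    · simp [hk] at h; simp [h]
    · simp only [hk] at h
      simp [ih h]

-- ===== VERDICT (by name: the statement is the Claim_ definition above) =====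
theorem enum_match_py_spec : Claim_equal_enum_match_py := by
  intro param cust_val eng_val _
  unfold Spec_enum_match_py enum_match_py enum_match_py_alt
  match cust_val, eng_val with
  | none, _ => rfl
  | some cv, none => rfl
  | some cv, some ev =>
    simp only
    split
    · rfl
    · rw [pvINDEX, lookup_map_snd]
      cases hl : pvEQUIV.lookup param with
      | none => simp [pvMatchGroups, pvLookupBoth, PySem.Dict.get?_empty]
      | some g =>
        simp only [Option.map_some, Option.getD_some]
        have hg : g ∈ pvEQUIV.map Prod.snd := lookup_mem_snd _ _ _ hl
        have hall : ∀ g ∈ pvEQUIV.map Prod.snd,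
            List.Pairwise (fun p q => ∀ y ∈ pvKeysOf p, y ∉ pvKeysOf q) g ∧
              (g.map Prod.fst).Nodup := by decide
        exact scan_eq_lookup g (hall g hg).1 (hall g hg).2 _ _
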